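-- pv_equiv track=rewrite | github.com/cailmdaley/containers | spt3g_software/scratch/joshuasobrin/clusters/coadd_220_maps_w_exclusions.py | split_input_maps
-- ===== SOURCE A (Python) =====
-- def split_input_maps(input_list):
--
--     index = 0
--     bundle_a = []
--     bundle_b = []
--
--     for obs in input_list:
--         if (index % 2) == 0:
--             bundle_a.append(obs)
--             index += 1
--         else:
--             bundle_b.append(obs)
--             index += 1
--
--     return bundle_a, bundle_b
-- ===== SOURCE B (Python) =====
-- def split_input_maps(input_list):
--     lst = list(input_list)
--     return lst[::2], lst[1::2]
-- ===== Notes on version B (the rewrite author's own statement) =====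
-- stated objective: simpler
-- what changed: Replaced A's single index-parity loop with two strided slices lst[::2] and lst[1::2] over the materialized list, eliminating the loop, counter and branch entirely.
import Mathlib
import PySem

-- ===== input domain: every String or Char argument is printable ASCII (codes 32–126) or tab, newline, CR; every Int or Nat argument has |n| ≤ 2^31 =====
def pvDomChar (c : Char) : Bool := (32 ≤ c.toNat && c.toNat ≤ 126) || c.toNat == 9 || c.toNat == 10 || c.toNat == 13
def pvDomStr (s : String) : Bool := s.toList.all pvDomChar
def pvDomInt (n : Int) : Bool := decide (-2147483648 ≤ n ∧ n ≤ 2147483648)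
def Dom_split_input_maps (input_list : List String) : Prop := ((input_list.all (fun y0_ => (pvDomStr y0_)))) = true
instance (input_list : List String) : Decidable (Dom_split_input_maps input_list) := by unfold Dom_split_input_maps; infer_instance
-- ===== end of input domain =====

-- B replaces A's index-parity loop with two strided slices lst[::2] / lst[1::2]; same return value (simpler, no speed claim).
-- ===== PORT A =====
-- transliteration of A: fold over the list carrying (index, bundle_a, bundle_b)
def split_input_maps (input_list : List String) : List String × List String :=
  let st := input_list.foldl
    (fun (st : Int × List String × List String) obs =>
      let (index, bundle_a, bundle_b) := st
      if PySem.Int.mod index 2 = 0 then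
        (index + 1, bundle_a ++ [obs], bundle_b)
      else
        (index + 1, bundle_a, bundle_b ++ [obs]))
    (0, [], [])
  (st.2.1, st.2.2)

-- ===== PORT B =====
-- transliteration of B: the two strided slices lst[::2] and lst[1::2].
-- slice? is some whenever the step is nonzero (here it is 2), so the `.getD []` default is never used.
def split_input_maps_alt (input_list : List String) : List String × List String :=
  ((PySem.List.slice? input_list none none 2).getD [],
   (PySem.List.slice? input_list (some 1) none 2).getD [])

-- ===== PRECONDITION & SPEC =====
def Spec_split_input_maps (input_list : List String) (out : List String × List String) : Prop := out = split_input_maps_alt input_list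
instance (input_list : List String) (out : List String × List String) : Decidable (Spec_split_input_maps input_list out) := by unfold Spec_split_input_maps; infer_instance

-- ===== CLAIM (what is proved, stated in full; the proofs are below) =====
def Claim_equal_split_input_maps : Prop := ∀ (input_list : List String), Dom_split_input_maps input_list → Spec_split_input_maps input_list (split_input_maps input_list)

-- ===== LEMMAS AND PROOFS =====

-- proof-only spec: pure two-step split (not used by either port)
def split2 (l : List String) : List String × List String :=
  match l with
  | [] => ([], [])
  | [x] => ([x], [])
  | x :: y :: rest => (x :: (split2 rest).1, y :: (split2 rest).2)

theorem split2_cons (x : String) (l : List String) :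
    split2 (x :: l) = (x :: (split2 l).2, (split2 l).1) := by
  induction l generalizing x with
  | nil => simp [split2]
  | cons y l ih =>
      simp only [split2]
      rw [ih y]

theorem mod_flip (i : Int) : (PySem.Int.mod (i + 1) 2 = 0) ↔ ¬ (PySem.Int.mod i 2 = 0) := by
  unfold PySem.Int.mod
  rw [Int.fmod_eq_emod, Int.fmod_eq_emod]
  simp
  omega

-- loop invariant for A's fold, phrased against split2
theorem foldA_eq (l : List String) (i : Int) (a b : List String) :
    l.foldl
      (fun (st : Int × List String × List String) obs =>
        let (index, bundle_a, bundle_b) := st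
        if PySem.Int.mod index 2 = 0 then
          (index + 1, bundle_a ++ [obs], bundle_b)
        else
          (index + 1, bundle_a, bundle_b ++ [obs]))
      (i, a, b)
    = if PySem.Int.mod i 2 = 0 then
        (i + l.length, a ++ (split2 l).1, b ++ (split2 l).2)
      else
        (i + l.length, a ++ (split2 l).2, b ++ (split2 l).1) := by
  induction l generalizing i a b with
  | nil => simp [split2]
  | cons x l ih =>
      simp only [List.foldl_cons]
      by_cases h : PySem.Int.mod i 2 = 0
      · simp only [h, if_true]
        rw [ih]
        have h1 : ¬ (PySem.Int.mod (i + 1) 2 = 0) := by rw [mod_flip]; exact fun hh => hh h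
        rw [if_neg h1]
        simp [split2_cons, List.append_assoc]
        omega
      · simp only [h, if_false]
        rw [ih]
        have h1 : PySem.Int.mod (i + 1) 2 = 0 := (mod_flip i).mpr h
        rw [if_pos h1]
        simp [split2_cons, List.append_assoc]
        omega

-- the even-index elements, picked by filterMap over a sufficiently long range
theorem filterMap_even (l : List String) (c : Nat) (hc : l.length ≤ 2 * c) :
    List.filterMap (fun k => l[2 * k]?) (List.range c) = (split2 l).1 := by
  induction l using split2.induct generalizing c with
  | case1 =>
      simp [split2]
  | case2 x =>
      obtain ⟨c', rfl⟩ : ∃ c', c = c' + 1 := ⟨c - 1, by simp at hc; omega⟩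
      rw [List.range_succ_eq_map]
      simp only [List.filterMap_cons, List.filterMap_map]
      simp [split2, Function.comp, Nat.mul_add]
  | case3 x y rest ih =>
      obtain ⟨c', rfl⟩ : ∃ c', c = c' + 1 := ⟨c - 1, by simp at hc; omega⟩
      rw [List.range_succ_eq_map]
      simp only [List.filterMap_cons, List.filterMap_map]
      have : (fun k => (x :: y :: rest)[2 * (k + 1)]?) = (fun k => rest[2 * k]?) := by
        funext k
        have : 2 * (k + 1) = 2 * k + 1 + 1 := by omega
        simp [this]
      simp only [Function.comp_def, this]
      rw [ih c' (by simp at hc; omega)]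
      simp [split2]

theorem slice_even (l : List String) :
    (PySem.List.slice? l none none 2).getD [] = (split2 l).1 := by
  unfold PySem.List.slice? PySem.List.sliceIndices
  simp only [if_neg (by norm_num : ¬ (2:Int) = 0)]
  simp only [show ¬ ((2:Int) < 0) from by norm_num, if_false, if_pos (by norm_num : (0:Int) < 2)]
  by_cases h : (0:Int) < l.length
  · rw [if_pos h]
    have harith : ((l.length : Int) - 0 + 2 - 1) / 2 = ((l.length + 1) / 2 : Nat) := by
      omega
    rw [harith]
    simp only [Int.toNat_natCast, Option.getD_some]
    have hidx : (fun k : Nat => l[(0 + 2 * (k:Int)).toNat]?) = (fun k : Nat => l[2 * k]?) := by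
      funext k
      congr 1
      omega
    rw [hidx, filterMap_even l _ (by omega)]
  · rw [if_neg h]
    have : l = [] := by
      cases l with
      | nil => rfl
      | cons a t => simp at h
    simp [this, split2]

theorem slice_odd (l : List String) :
    (PySem.List.slice? l (some 1) none 2).getD [] = (split2 l).2 := by
  cases l with
  | nil => simp [PySem.List.slice?, PySem.List.sliceIndices, split2]
  | cons x t =>
      unfold PySem.List.slice? PySem.List.sliceIndices
      simp only [if_neg (by norm_num : ¬ (2:Int) = 0)]
      simp only [show ¬ ((2:Int) < 0) from by norm_num, if_false,
        if_neg (by norm_num : ¬ ((1:Int) < 0)), if_pos (by norm_num : (0:Int) < 2)]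
      have hlen : ((x :: t).length : Int) = (t.length : Int) + 1 := by simp
      have hmin : min (1:Int) ((x :: t).length : Int) = 1 := by
        rw [hlen]; omega
      rw [hmin]
      by_cases h : (1:Int) < (x :: t).length
      · rw [if_pos h]
        have harith : (((x :: t).length : Int) - 1 + 2 - 1) / 2 = (((x :: t).length) / 2 : Nat) := by
          omega
        rw [harith]
        simp only [Int.toNat_natCast, Option.getD_some]
        have hidx : (fun k : Nat => (x :: t)[(1 + 2 * (k:Int)).toNat]?) = (fun k : Nat => t[2 * k]?) := by
          funext k
          have h1 : (1 + 2 * (k:Int)).toNat = 2 * k + 1 := by omega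
          rw [h1]
          simp
        rw [hidx, filterMap_even t _ (by simp only [List.length_cons] at h ⊢; omega)]
        rw [split2_cons]
      · rw [if_neg h]
        have : t = [] := by
          cases t with
          | nil => rfl
          | cons b u => exfalso; apply h; simp
        simp [this, split2]

-- ===== VERDICT (by name: the statement is the Claim_ definition above) =====
theorem split_input_maps_spec : Claim_equal_split_input_maps := by
  intro l _
  unfold Spec_split_input_maps split_input_maps split_input_maps_alt
  rw [foldA_eq, slice_even, slice_odd]
  simp
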